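-- pv_equiv track=rewrite | github.com/li3zon3/automotive_codes | fortune.py | calc_destiny_number
-- ===== SOURCE A (Python) =====
-- exception = [11, 22, 33]
--
-- def reduce_num(num):
--     if (num in exception) or (num < 10):
--         return num
--
--     s = 0
--     while num:
--         s += num % 10;
--         num = num // 10;
--
--     return reduce_num(s)
--
-- def calc_destiny_number(name):
--     sum_parts = []
--     name_parts = name.split()
--     for part in name_parts:
--         s = sum(list(map(lambda c: (ord(c) - 0x41) % 9 + 1, list(part))))
--         sum_parts.append(s)
--
--     type1 = reduce_num(sum([reduce_num(part) for part in sum_parts]))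
--
--     return [type1]
-- ===== SOURCE B (Python) =====
-- def _digit_sum(num):
--     s = 0
--     while num > 0:
--         num, d = divmod(num, 10)
--         s += d
--     return s
--
-- def _reduce(num):
--     while num >= 10 and num not in (11, 22, 33):
--         num = _digit_sum(num)
--     return num
--
-- def calc_destiny_number(name):
--     total = 0
--     for part in name.split():
--         total += _reduce(sum((ord(c) - 0x41) % 9 + 1 for c in part))
--     return [_reduce(total)]
-- ===== Notes on version B (the rewrite author's own statement) =====
-- stated objective: simpler
-- what changed: Replaces the recursive reduce_num (membership-test-first, while-digit-loop inside) by an iterative reduce loop over a separate divmod digit-sum helper, and replaces the main function's intermediate per-part sum list plus second reduce-map comprehension by a single running total accumulated in one pass.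
import Mathlib
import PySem

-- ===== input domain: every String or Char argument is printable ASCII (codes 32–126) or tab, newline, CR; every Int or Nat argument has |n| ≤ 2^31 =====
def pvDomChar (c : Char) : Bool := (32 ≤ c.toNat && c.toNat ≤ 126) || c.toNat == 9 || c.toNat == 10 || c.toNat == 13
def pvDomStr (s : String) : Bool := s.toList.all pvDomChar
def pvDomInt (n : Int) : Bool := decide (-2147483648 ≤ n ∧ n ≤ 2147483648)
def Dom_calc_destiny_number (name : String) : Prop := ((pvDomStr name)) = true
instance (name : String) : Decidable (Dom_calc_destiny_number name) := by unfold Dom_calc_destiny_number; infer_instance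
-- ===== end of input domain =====

-- B replaces A's recursive reduce_num + list-building main loop by an iterative
-- reduce loop over a divmod digit-sum helper and a single running total (simpler decomposition).

-- ===== PORT A =====
-- A's inner `while num:` loop. `fuel` is only a totality guard: the loop is entered with
-- num ≥ 10 and fuel = num.toNat, which always exceeds the number of iterations (num
-- shrinks by a factor of 10 each step), so the 0-fuel branch is never taken there; the
-- `num ≤ 0` test is `while num:`'s exit on the reachable (positive) values.
def pvLoopA : Nat → Int → Int → Int
  | 0, s, _ => s
  | fuel + 1, s, num =>
    if num ≤ 0 then s
    else pvLoopA fuel (s + PySem.Int.mod num 10) (PySem.Int.floordiv num 10)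

-- fuel = num.toNat bounds the recursion depth (each step strictly shrinks num, which
-- stays ≥ 10 while recursing), so it never runs out on the values Python reaches
def pvReduceA : Nat → Int → Int
  | 0, num => num
  | fuel + 1, num =>
    if (num = 11 ∨ num = 22 ∨ num = 33) ∨ num < 10 then num
    else pvReduceA fuel (pvLoopA num.toNat 0 num)

def reduce_num (num : Int) : Int := pvReduceA num.toNat num

def calc_destiny_number (name : String) : List Int :=
  let name_parts := PySem.Str.split₀ name
  let sum_parts := name_parts.foldl
    (fun acc part =>
      acc ++ [(part.toList.map (fun c => PySem.Int.mod ((c.toNat : Int) - 0x41) 9 + 1)).sum]) []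
  let type1 := reduce_num ((sum_parts.map (fun p => reduce_num p)).sum)
  [type1]

-- ===== PORT B =====
-- fuel is a totality guard exactly as on the A side (same bound, same reasoning)
def pvDigitSumB : Nat → Int → Int → Int
  | 0, _, s => s
  | fuel + 1, num, s =>
    if 0 < num then pvDigitSumB fuel (PySem.Int.floordiv num 10) (s + PySem.Int.mod num 10) else s

def pvReduceLoopB : Nat → Int → Int
  | 0, num => num
  | fuel + 1, num =>
    if 10 ≤ num ∧ num ≠ 11 ∧ num ≠ 22 ∧ num ≠ 33 then pvReduceLoopB fuel (pvDigitSumB num.toNat num 0)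
    else num

def pvReduceB (num : Int) : Int := pvReduceLoopB num.toNat num

def calc_destiny_number_alt (name : String) : List Int :=
  let total := (PySem.Str.split₀ name).foldl
    (fun total part =>
      total + pvReduceB (part.toList.foldl (fun s c => s + (PySem.Int.mod ((c.toNat : Int) - 0x41) 9 + 1)) 0)) 0
  [pvReduceB total]

-- ===== PRECONDITION & SPEC =====
def Spec_calc_destiny_number (name : String) (out : List Int) : Prop := out = calc_destiny_number_alt name
instance (name : String) (out : List Int) : Decidable (Spec_calc_destiny_number name out) := by unfold Spec_calc_destiny_number; infer_instance

-- ===== CLAIM (what is proved, stated in full; the proofs are below) =====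
def Claim_equal_calc_destiny_number : Prop := ∀ (name : String), Dom_calc_destiny_number name → Spec_calc_destiny_number name (calc_destiny_number name)

-- ===== LEMMAS AND PROOFS =====

theorem digit_loops_eq (fuel : Nat) : ∀ num s : Int, pvDigitSumB fuel num s = pvLoopA fuel s num := by
  induction fuel with
  | zero => intro num s; rfl
  | succ fuel ih =>
    intro num s
    unfold pvDigitSumB pvLoopA
    by_cases h : 0 < num
    · rw [if_pos h, if_neg (by omega), ih]
    · rw [if_neg h, if_pos (by omega)]

theorem reduce_loops_eq (fuel : Nat) : ∀ num : Int, pvReduceA fuel num = pvReduceLoopB fuel num := by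
  induction fuel with
  | zero => intro num; rfl
  | succ fuel ih =>
    intro num
    unfold pvReduceA pvReduceLoopB
    by_cases h : (num = 11 ∨ num = 22 ∨ num = 33) ∨ num < 10
    · rw [if_pos h, if_neg (by rintro ⟨h1, h2, h3, h4⟩; omega)]
    · rw [if_neg h, if_pos (by omega), digit_loops_eq, ih]

theorem reduce_eq (num : Int) : reduce_num num = pvReduceB num := by
  unfold reduce_num pvReduceB
  exact reduce_loops_eq num.toNat num

theorem foldl_push {α β : Type} (g : α → β) (l : List α) :
    ∀ acc : List β, l.foldl (fun acc x => acc ++ [g x]) acc = acc ++ l.map g := by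
  induction l with
  | nil => intro acc; simp
  | cons x xs ih => intro acc; simp [List.foldl_cons, ih]

theorem foldl_add_map {α : Type} (g : α → Int) (l : List α) :
    ∀ s : Int, l.foldl (fun s x => s + g x) s = s + (l.map g).sum := by
  induction l with
  | nil => intro s; simp
  | cons x xs ih => intro s; simp [List.foldl_cons, ih]; ring

-- ===== VERDICT (by name: the statement is the Claim_ definition above) =====
theorem calc_destiny_number_spec : Claim_equal_calc_destiny_number := by
  intro name _
  unfold Spec_calc_destiny_number calc_destiny_number calc_destiny_number_alt
  simp only [foldl_push, foldl_add_map, reduce_eq, List.nil_append, List.map_map,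
    zero_add, Function.comp_def]
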